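-- pv_equiv track=rewrite | github.com/ngho470-pixel/project | fast_sweep_rls_vs_ours.py | rewrite_policy_expr
-- ===== SOURCE A (Python) =====
-- from typing import Dict, List, Tuple
--
-- KEYWORDS = {'and','or','in','like','not','is','null','between','exists'}
--
-- def tokenize(expr: str) -> List[Tuple[str,str]]:
--     tokens = []
--     i = 0
--     while i < len(expr):
--         ch = expr[i]
--         if ch.isspace():
--             i += 1
--             continue
--         if ch.isalpha() or ch == '_':
--             j = i+1
--             while j < len(expr) and (expr[j].isalnum() or expr[j] in '_.'):
--                 j += 1
--             tokens.append(('ident', expr[i:j]))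
--             i = j
--             continue
--         if ch.isdigit() or (ch=='-' and i+1 < len(expr) and expr[i+1].isdigit()):
--             j = i+1
--             while j < len(expr) and (expr[j].isdigit() or expr[j]=='.'):
--                 j += 1
--             tokens.append(('number', expr[i:j]))
--             i = j
--             continue
--         if ch == "'":
--             j = i+1
--             buf = ''
--             while j < len(expr):
--                 if expr[j] == "'" and j+1 < len(expr) and expr[j+1] == "'":
--                     buf += "'"
--                     j += 2
--                     continue
--                 if expr[j] == "'":
--                     j += 1
--                     break
--                 buf += expr[j]
--                 j += 1
--             tokens.append(('string', buf))
--             i = j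
--             continue
--         if ch in '(),':
--             tokens.append((ch, ch))
--             i += 1
--             continue
--         if ch in '=<>!':
--             j = i+1
--             if j < len(expr) and expr[j] == '=':
--                 j += 1
--             tokens.append(('op', expr[i:j]))
--             i = j
--             continue
--         # default
--         tokens.append((ch, ch))
--         i += 1
--     return tokens
--
-- def rewrite_policy_expr(target: str, expr: str) -> Tuple[str,List[str]]:
--     tokens = tokenize(expr)
--     other_tables = []
--     out_parts = []
--     for typ, text in tokens:
--         if typ == 'ident':
--             low = text.lower()
--             if low in KEYWORDS:
--                 out_parts.append(low)
--                 continue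
--             if '.' in text:
--                 tbl, col = text.split('.',1)
--                 tbl_low = tbl.lower()
--                 col_low = col.lower()
--                 if tbl_low == target.lower():
--                     out_parts.append(f"{col_low}")
--                 else:
--                     out_parts.append(f"{tbl_low}.{col_low}")
--                     if tbl_low not in other_tables:
--                         other_tables.append(tbl_low)
--             else:
--                 out_parts.append(f"{low}")
--         elif typ == 'string':
--             out_parts.append("'" + text.replace("'","''") + "'")
--         elif typ == 'number':
--             out_parts.append(text)
--         elif typ == 'op':
--             out_parts.append(text)
--         else:
--             out_parts.append(text)
--     expr_sql = ' '.join(out_parts)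
--     if other_tables:
--         from_clause = ', '.join(other_tables)
--         expr_sql = f"EXISTS (SELECT 1 FROM {from_clause} WHERE {expr_sql})"
--     return expr_sql, other_tables
-- ===== SOURCE B (Python) =====
-- from typing import List, Tuple
--
-- KEYWORDS = {'and','or','in','like','not','is','null','between','exists'}
--
-- # A table-driven single-pass DFA: tokenizing and rewriting are fused (no intermediate
-- # token list); nested lookahead loops of A become explicit scanner states.
-- START, IDENT, NUM, DASH, STR, STRQ, OP = range(7)
--
-- def rewrite_policy_expr(target: str, expr: str) -> Tuple[str, List[str]]:
--     tgt = target.lower()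
--     parts: List[str] = []
--     tables: List[str] = []
--
--     def emit_ident(text: str) -> None:
--         word = text.lower()
--         if word in KEYWORDS or '.' not in word:
--             parts.append(word)
--         else:
--             tbl, col = word.split('.', 1)
--             if tbl == tgt:
--                 parts.append(col)
--             else:
--                 parts.append(word)
--                 if tbl not in tables:
--                     tables.append(tbl)
--
--     state = START
--     buf = ''
--     for ch in expr:
--         while True:
--             if state == START:
--                 if ch.isspace():
--                     pass
--                 elif ch.isalpha() or ch == '_':
--                     state, buf = IDENT, ch
--                 elif ch.isdigit():
--                     state, buf = NUM, ch
--                 elif ch == '-':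
--                     state = DASH
--                 elif ch == "'":
--                     state, buf = STR, ''
--                 elif ch in '=<>!':
--                     state, buf = OP, ch
--                 else:
--                     parts.append(ch)
--                 break
--             if state == IDENT:
--                 if ch.isalnum() or ch in '_.':
--                     buf += ch
--                     break
--                 emit_ident(buf)
--                 state = START
--                 continue
--             if state == NUM:
--                 if ch.isdigit() or ch == '.':
--                     buf += ch
--                     break
--                 parts.append(buf)
--                 state = START
--                 continue
--             if state == DASH:
--                 if ch.isdigit():
--                     state, buf = NUM, '-' + ch
--                     break
--                 parts.append('-')
--                 state = START
--                 continue
--             if state == STR: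
--                 if ch == "'":
--                     state = STRQ
--                 else:
--                     buf += ch
--                 break
--             if state == STRQ:
--                 if ch == "'":
--                     buf += "'"
--                     state = STR
--                     break
--                 parts.append("'" + buf.replace("'", "''") + "'")
--                 state = START
--                 continue
--             if state == OP:
--                 if ch == '=':
--                     parts.append(buf + '=')
--                     state = START
--                     break
--                 parts.append(buf)
--                 state = START
--                 continue
--     if state == IDENT:
--         emit_ident(buf)
--     elif state in (NUM, OP):
--         parts.append(buf)
--     elif state == DASH:
--         parts.append('-')
--     elif state in (STR, STRQ):
--         parts.append("'" + buf.replace("'", "''") + "'")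
--
--     expr_sql = ' '.join(parts)
--     if tables:
--         expr_sql = f"EXISTS (SELECT 1 FROM {', '.join(tables)} WHERE {expr_sql})"
--     return expr_sql, tables
-- ===== Notes on version B (the rewrite author's own statement) =====
-- stated objective: alternative
-- what changed: A tokenizes with an index-based scanner using nested lookahead while-loops and then rewrites the token list in a second pass; B is a single-pass table-driven DFA (explicit scanner states START/IDENT/NUM/DASH/STR/STRQ/OP) that rewrites and collects other tables on the fly, with no intermediate token list, lowering each identifier once before splitting on the dot.
import Mathlib
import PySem

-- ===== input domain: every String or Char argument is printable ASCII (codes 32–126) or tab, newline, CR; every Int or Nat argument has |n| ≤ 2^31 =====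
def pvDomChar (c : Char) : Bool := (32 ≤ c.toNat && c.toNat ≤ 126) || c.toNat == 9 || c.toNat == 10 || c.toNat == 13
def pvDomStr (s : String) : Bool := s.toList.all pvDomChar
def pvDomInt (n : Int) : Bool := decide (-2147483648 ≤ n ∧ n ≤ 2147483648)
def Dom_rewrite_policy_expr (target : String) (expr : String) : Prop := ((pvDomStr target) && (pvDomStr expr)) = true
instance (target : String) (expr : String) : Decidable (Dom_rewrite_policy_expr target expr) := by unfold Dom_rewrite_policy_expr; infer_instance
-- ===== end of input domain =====

-- B replaces A's two-phase tokenizer (nested lookahead loops + token list) by a single-pass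
-- table-driven DFA fused with the rewrite step; objective: alternative (same O(n) cost).

-- ===== shared helpers (used verbatim by both Pythons) =====

-- KEYWORDS = {'and','or','in','like','not','is','null','between','exists'}
def pvKEYWORDS : PySem.Set (List Char) :=
  PySem.Set.ofList [['a','n','d'], ['o','r'], ['i','n'], ['l','i','k','e'], ['n','o','t'],
    ['i','s'], ['n','u','l','l'], ['b','e','t','w','e','e','n'], ['e','x','i','s','t','s']]

-- `c.isalnum() or c in '_.'`
def pvIdentCont (c : Char) : Bool := PySem.Chars.isalnum c || c == '_' || c == '.'

-- `s.split('.', 1)` when '.' occurs in s (exact in that case: head piece, rest after first dot)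
def pvSplitDot (cs : List Char) : List Char × List Char :=
  let t := cs.takeWhile (fun c => !(c == '.'))
  (t, cs.drop (t.length + 1))

-- `"'" + text.replace("'", "''") + "'"`
def pvQuote (text : List Char) : List Char :=
  '\'' :: PySem.Chars.replace text ['\''] ['\'', '\''] ++ ['\'']

-- token-type tags of A ('ident' / 'number' / 'string' / 'op'; punct and default carry the char)
def pvTyIdent : List Char := ['i','d','e','n','t']
def pvTyNumber : List Char := ['n','u','m','b','e','r']
def pvTyString : List Char := ['s','t','r','i','n','g']
def pvTyOp : List Char := ['o','p']

-- ===== PORT A =====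

-- inner while of the ident branch: returns (consumed run, rest)
def pvScanIdent : List Char → List Char × List Char
  | [] => ([], [])
  | c :: cs =>
    if pvIdentCont c then ((c :: (pvScanIdent cs).1), (pvScanIdent cs).2)
    else ([], c :: cs)

-- inner while of the number branch
def pvScanNum : List Char → List Char × List Char
  | [] => ([], [])
  | c :: cs =>
    if PySem.Chars.isdigit c || c == '.' then ((c :: (pvScanNum cs).1), (pvScanNum cs).2)
    else ([], c :: cs)

-- inner while of the string branch: returns (buf with '' decoded, rest after the terminator)
def pvScanStr : List Char → List Char × List Char
  | [] => ([], [])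
  | c :: cs =>
    if c == '\'' then
      match cs with
      | c2 :: cs2 =>
        if c2 == '\'' then (('\'' :: (pvScanStr cs2).1), (pvScanStr cs2).2)
        else ([], cs)
      | [] => ([], [])
    else ((c :: (pvScanStr cs).1), (pvScanStr cs).2)

theorem pvScanIdent_rest_le (cs : List Char) : (pvScanIdent cs).2.length ≤ cs.length := by
  induction cs with
  | nil => simp [pvScanIdent]
  | cons c cs ih => by_cases h : pvIdentCont c <;> simp [pvScanIdent, h] <;> omega

theorem pvScanNum_rest_le (cs : List Char) : (pvScanNum cs).2.length ≤ cs.length := by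
  induction cs with
  | nil => simp [pvScanNum]
  | cons c cs ih =>
    by_cases h : (PySem.Chars.isdigit c || c == '.') = true <;> simp [pvScanNum, h] <;> omega

theorem pvScanStr_rest_le (cs : List Char) : (pvScanStr cs).2.length ≤ cs.length := by
  induction cs using pvScanStr.induct
  all_goals rw [pvScanStr.eq_def]
  all_goals simp_all
  all_goals omega

-- tokenize(expr): the outer while loop, one step per token
def pvTokenize : List Char → List (List Char × List Char)
  | [] => []
  | c :: cs =>
    if PySem.Chars.isspace c then pvTokenize cs
    else if PySem.Chars.isalpha c || c == '_' then
      (pvTyIdent, c :: (pvScanIdent cs).1) :: pvTokenize (pvScanIdent cs).2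
    else if PySem.Chars.isdigit c || (c == '-' && cs.head?.any PySem.Chars.isdigit) then
      (pvTyNumber, c :: (pvScanNum cs).1) :: pvTokenize (pvScanNum cs).2
    else if c == '\'' then
      (pvTyString, (pvScanStr cs).1) :: pvTokenize (pvScanStr cs).2
    else if c == '(' || c == ')' || c == ',' then
      ([c], [c]) :: pvTokenize cs
    else if c == '=' || c == '<' || c == '>' || c == '!' then
      if cs.head? = some '=' then (pvTyOp, [c, '=']) :: pvTokenize cs.tail
      else (pvTyOp, [c]) :: pvTokenize cs
    else ([c], [c]) :: pvTokenize cs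
termination_by cs => cs.length
decreasing_by
  all_goals first
    | (have := pvScanIdent_rest_le cs; simp; omega)
    | (have := pvScanNum_rest_le cs; simp; omega)
    | (have := pvScanStr_rest_le cs; simp; omega)
    | (simp; omega)
    | simp
    | (rename_i h; simp [List.length_tail]; omega)

-- one iteration of A's rewrite loop; state is (other_tables, out_parts)
def pvRewriteTok (target : List Char) (st : List (List Char) × List (List Char))
    (tok : List Char × List Char) : List (List Char) × List (List Char) :=
  let tables := st.1
  let parts := st.2
  let typ := tok.1
  let text := tok.2
  if typ = pvTyIdent then
    let low := PySem.Chars.lower text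
    if pvKEYWORDS.contains low then (tables, parts ++ [low])
    else if PySem.Chars.isIn ['.'] text then
      let tbl := (pvSplitDot text).1
      let col := (pvSplitDot text).2
      let tblLow := PySem.Chars.lower tbl
      let colLow := PySem.Chars.lower col
      if tblLow = PySem.Chars.lower target then (tables, parts ++ [colLow])
      else ((if tables.contains tblLow then tables else tables ++ [tblLow]),
            parts ++ [tblLow ++ '.' :: colLow])
    else (tables, parts ++ [low])
  else if typ = pvTyString then (tables, parts ++ [pvQuote text])
  else if typ = pvTyNumber then (tables, parts ++ [text])
  else if typ = pvTyOp then (tables, parts ++ [text])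
  else (tables, parts ++ [text])

def rewrite_policy_expr (target : String) (expr : String) : String × List String :=
  let tokens := pvTokenize expr.toList
  let st := tokens.foldl (pvRewriteTok target.toList) ([], [])
  let tables := st.1
  let parts := st.2
  let exprSql := PySem.Chars.join [' '] parts
  let sql := if tables.isEmpty then exprSql
    else "EXISTS (SELECT 1 FROM ".toList ++ PySem.Chars.join [',', ' '] tables
         ++ " WHERE ".toList ++ exprSql ++ [')']
  (String.mk sql, tables.map String.mk)

-- ===== PORT B =====

-- DFA states START, IDENT, NUM, DASH, STR, STRQ, OP
inductive PvSt : Type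
  | start | ident | num | dash | strg | strq | op
deriving DecidableEq, Repr

-- B's accumulator: (parts, tables)
abbrev PvAcc : Type := List (List Char) × List (List Char)

-- emit_ident (B lowers first, then splits)
def pvEmitIdent (tgt : List Char) (acc : PvAcc) (text : List Char) : PvAcc :=
  let word := PySem.Chars.lower text
  if pvKEYWORDS.contains word || !(PySem.Chars.isIn ['.'] word) then (acc.1 ++ [word], acc.2)
  else
    let tbl := (pvSplitDot word).1
    let col := (pvSplitDot word).2
    if tbl = tgt then (acc.1 ++ [col], acc.2)
    else (acc.1 ++ [word], (if acc.2.contains tbl then acc.2 else acc.2 ++ [tbl]))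

-- the `state == START` dispatch
def pvStartCase (acc : PvAcc) (buf : List Char) (ch : Char) : PvAcc × PvSt × List Char :=
  if PySem.Chars.isspace ch then (acc, .start, buf)
  else if PySem.Chars.isalpha ch || ch == '_' then (acc, .ident, [ch])
  else if PySem.Chars.isdigit ch then (acc, .num, [ch])
  else if ch == '-' then (acc, .dash, buf)
  else if ch == '\'' then (acc, .strg, [])
  else if ch == '=' || ch == '<' || ch == '>' || ch == '!' then (acc, .op, [ch])
  else ((acc.1 ++ [[ch]], acc.2), .start, buf)

-- one character of the `for ch in expr` loop (the inner `while True` re-dispatches into pvStartCase)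
def pvStep (tgt : List Char) (f : PvAcc × PvSt × List Char) (ch : Char) : PvAcc × PvSt × List Char :=
  let acc := f.1
  let buf := f.2.2
  match f.2.1 with
  | .start => pvStartCase acc buf ch
  | .ident =>
    if pvIdentCont ch then (acc, .ident, buf ++ [ch])
    else pvStartCase (pvEmitIdent tgt acc buf) buf ch
  | .num =>
    if PySem.Chars.isdigit ch || ch == '.' then (acc, .num, buf ++ [ch])
    else pvStartCase (acc.1 ++ [buf], acc.2) buf ch
  | .dash =>
    if PySem.Chars.isdigit ch then (acc, .num, ['-', ch])
    else pvStartCase (acc.1 ++ [['-']], acc.2) buf ch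
  | .strg =>
    if ch == '\'' then (acc, .strq, buf) else (acc, .strg, buf ++ [ch])
  | .strq =>
    if ch == '\'' then (acc, .strg, buf ++ ['\''])
    else pvStartCase (acc.1 ++ [pvQuote buf], acc.2) buf ch
  | .op =>
    if ch == '=' then ((acc.1 ++ [buf ++ ['=']], acc.2), .start, buf)
    else pvStartCase (acc.1 ++ [buf], acc.2) buf ch

-- the post-loop finalization
def pvFinish (tgt : List Char) (f : PvAcc × PvSt × List Char) : PvAcc :=
  let acc := f.1
  let buf := f.2.2
  match f.2.1 with
  | .start => acc
  | .ident => pvEmitIdent tgt acc buf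
  | .num => (acc.1 ++ [buf], acc.2)
  | .dash => (acc.1 ++ [['-']], acc.2)
  | .strg => (acc.1 ++ [pvQuote buf], acc.2)
  | .strq => (acc.1 ++ [pvQuote buf], acc.2)
  | .op => (acc.1 ++ [buf], acc.2)

def rewrite_policy_expr_alt (target : String) (expr : String) : String × List String :=
  let tgt := PySem.Chars.lower target.toList
  let acc := pvFinish tgt (expr.toList.foldl (pvStep tgt) (([], []), .start, []))
  let parts := acc.1
  let tables := acc.2
  let exprSql := PySem.Chars.join [' '] parts
  let sql := if tables.isEmpty then exprSql
    else "EXISTS (SELECT 1 FROM ".toList ++ PySem.Chars.join [',', ' '] tables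
         ++ " WHERE ".toList ++ exprSql ++ [')']
  (String.mk sql, tables.map String.mk)

-- ===== PRECONDITION & SPEC =====
def Spec_rewrite_policy_expr (target : String) (expr : String) (out : String × List String) : Prop := out = rewrite_policy_expr_alt target expr
instance (target : String) (expr : String) (out : String × List String) : Decidable (Spec_rewrite_policy_expr target expr out) := by unfold Spec_rewrite_policy_expr; infer_instance

-- ===== CLAIM (what is proved, stated in full; the proofs are below) =====
def Claim_equal_rewrite_policy_expr : Prop := ∀ (target : String) (expr : String), Dom_rewrite_policy_expr target expr → Spec_rewrite_policy_expr target expr (rewrite_policy_expr target expr)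

-- ===== LEMMAS AND PROOFS =====


theorem pv_lowerChar_dot (c : Char) : (PySem.Chars.lowerChar c = '.') ↔ (c = '.') := by
  unfold PySem.Chars.lowerChar PySem.Chars.isupper
  split
  · rename_i h
    simp only [decide_eq_true_eq, Bool.and_eq_true, Char.le_def, UInt32.le_iff_toNat_le] at h
    have htn : c.toNat = c.val.toNat := rfl
    constructor
    · intro hc
      exfalso
      have h2 := congrArg Char.toNat hc
      rw [Char.toNat_ofNat, if_pos] at h2
      · rw [htn] at h2
        simp at h2 h
        omega
      · unfold Nat.isValidChar
        rw [htn]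
        simp at h ⊢
        omega
    · intro hc
      subst hc
      exfalso
      revert h
      decide
  · simp
theorem pv_digit_not_space (c : Char) (h : PySem.Chars.isdigit c = true) :
    PySem.Chars.isspace c = false := by
  unfold PySem.Chars.isdigit at h
  unfold PySem.Chars.isspace
  have htn : c.toNat = c.val.toNat := rfl
  simp only [Bool.and_eq_true, decide_eq_true_eq, Char.le_def, UInt32.le_iff_toNat_le] at h
  simp only [htn, Bool.or_eq_false_iff, Bool.and_eq_false_iff, decide_eq_false_iff_not]
  simp at h ⊢
  omega
theorem pv_digit_not_alpha (c : Char) (h : PySem.Chars.isdigit c = true) :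
    (PySem.Chars.isalpha c || c == '_') = false := by
  unfold PySem.Chars.isdigit at h
  unfold PySem.Chars.isalpha PySem.Chars.isupper PySem.Chars.islower
  simp only [Bool.and_eq_true, decide_eq_true_eq, Char.le_def, UInt32.le_iff_toNat_le] at h
  simp only [Bool.or_eq_false_iff, Bool.and_eq_false_iff, decide_eq_false_iff_not, Char.le_def,
    UInt32.le_iff_toNat_le, beq_eq_false_iff_ne, ne_eq]
  simp at h ⊢
  constructor
  · omega
  · intro hc; subst hc; simp_all
theorem pv_isIn_dot_mem (cs : List Char) : PySem.Chars.isIn ['.'] cs = true ↔ '.' ∈ cs := by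
  rw [PySem.Chars.isIn_iff_infix, List.singleton_infix_iff]
theorem pv_isIn_dot_lower (cs : List Char) :
    PySem.Chars.isIn ['.'] (PySem.Chars.lower cs) = PySem.Chars.isIn ['.'] cs := by
  rcases h : PySem.Chars.isIn ['.'] cs with _ | _
  · rw [← Bool.not_eq_true] at h ⊢
    rw [pv_isIn_dot_mem] at h ⊢
    intro hm
    rcases List.mem_map.mp hm with ⟨c, hc, hlc⟩
    exact h (((pv_lowerChar_dot c).mp hlc) ▸ hc)
  · rw [pv_isIn_dot_mem] at h ⊢
    exact List.mem_map.mpr ⟨'.', h, (pv_lowerChar_dot '.').mpr rfl⟩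
theorem pv_pred_lower :
    ((fun c => !(c == '.')) ∘ PySem.Chars.lowerChar) = (fun c : Char => !(c == '.')) := by
  funext c
  by_cases hc : c = '.'
  · subst hc; decide
  · have h2 : PySem.Chars.lowerChar c ≠ '.' := fun he => hc ((pv_lowerChar_dot c).mp he)
    simp [Function.comp_apply, hc, h2]
theorem pv_splitDot_lower (cs : List Char) :
    pvSplitDot (PySem.Chars.lower cs)
      = (PySem.Chars.lower (pvSplitDot cs).1, PySem.Chars.lower (pvSplitDot cs).2) := by
  unfold pvSplitDot PySem.Chars.lower
  simp only [List.takeWhile_map, pv_pred_lower, List.length_map, ← List.map_drop]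
theorem pv_splitDot_recompose : ∀ cs : List Char, '.' ∈ cs →
    (pvSplitDot cs).1 ++ '.' :: (pvSplitDot cs).2 = cs := by
  intro cs h
  induction cs with
  | nil => simp at h
  | cons c cs ih =>
    by_cases hc : c = '.'
    · subst hc; simp [pvSplitDot]
    · have hm : '.' ∈ cs := by
        rcases List.mem_cons.mp h with h' | h'
        · exact absurd h'.symm hc
        · exact h'
      have e1 : (!(c == '.')) = true := by simp [hc]
      simp only [pvSplitDot, List.takeWhile_cons, e1, if_true, List.length_cons, List.drop_succ_cons,
        List.cons_append, List.cons.injEq, true_and]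
      exact ih hm

-- fold-with-finish of B, the shape the scan lemmas talk about
def pvFF (tgt : List Char) (f : PvAcc × PvSt × List Char) (cs : List Char) : PvAcc :=
  pvFinish tgt (cs.foldl (pvStep tgt) f)

theorem pvFF_cons (tgt f c cs) : pvFF tgt f (c :: cs) = pvFF tgt (pvStep tgt f c) cs := rfl

-- A's rewrite step on each token kind, phrased against B's emitters
theorem pvTok_string (target : List Char) (t p : List (List Char)) (b : List Char) :
    pvRewriteTok target (t, p) (pvTyString, b) = (t, p ++ [pvQuote b]) := by
  simp [pvRewriteTok, pvTyString, pvTyIdent]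
theorem pvTok_number (target : List Char) (t p : List (List Char)) (b : List Char) :
    pvRewriteTok target (t, p) (pvTyNumber, b) = (t, p ++ [b]) := by
  simp [pvRewriteTok, pvTyNumber, pvTyIdent, pvTyString]
theorem pvTok_op (target : List Char) (t p : List (List Char)) (b : List Char) :
    pvRewriteTok target (t, p) (pvTyOp, b) = (t, p ++ [b]) := by
  simp [pvRewriteTok, pvTyOp, pvTyIdent, pvTyString, pvTyNumber]
theorem pvTok_char (target : List Char) (t p : List (List Char)) (c : Char) :
    pvRewriteTok target (t, p) ([c], [c]) = (t, p ++ [[c]]) := by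
  simp [pvRewriteTok, pvTyOp, pvTyIdent, pvTyString, pvTyNumber]
theorem pvTok_ident (target : List Char) (t p : List (List Char)) (text : List Char) :
    pvRewriteTok target (t, p) (pvTyIdent, text)
      = ((pvEmitIdent (PySem.Chars.lower target) (p, t) text).2,
         (pvEmitIdent (PySem.Chars.lower target) (p, t) text).1) := by
  by_cases hk : PySem.Chars.lower text ∈ pvKEYWORDS
  · simp [pvRewriteTok, pvEmitIdent, hk]
  · by_cases hd : PySem.Chars.isIn ['.'] text = true
    · have hd' : PySem.Chars.isIn ['.'] (PySem.Chars.lower text) = true := by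
        rw [pv_isIn_dot_lower]; exact hd
      have hsl := pv_splitDot_lower text
      by_cases ht : PySem.Chars.lower (pvSplitDot text).1 = PySem.Chars.lower target
      · simp [pvRewriteTok, pvEmitIdent, hk, hd, hd', hsl, ht]
      · have hrec : (pvSplitDot text).1 ++ '.' :: (pvSplitDot text).2 = text :=
          pv_splitDot_recompose text ((pv_isIn_dot_mem text).mp hd)
        have hlow : PySem.Chars.lower text
            = PySem.Chars.lower (pvSplitDot text).1 ++ '.' :: PySem.Chars.lower (pvSplitDot text).2 := by
          conv_lhs => rw [← hrec]
          simp [PySem.Chars.lower, List.map_append]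
          decide
        simp [pvRewriteTok, pvEmitIdent, hk, hd, hd', hsl, ht, ← hlow]
    · have hd' : PySem.Chars.isIn ['.'] (PySem.Chars.lower text) = false := by
        rw [pv_isIn_dot_lower]; simpa using hd
      simp [pvRewriteTok, pvEmitIdent, hk, hd, hd']

-- the buffer is dead in the START and DASH states
theorem pvFF_buf_irrel (cs : List Char) :
    (∀ (tgt : List Char) (acc : PvAcc) (buf buf' : List Char),
        pvFF tgt (acc, .start, buf) cs = pvFF tgt (acc, .start, buf') cs)
    ∧ (∀ (tgt : List Char) (acc : PvAcc) (buf buf' : List Char),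
        pvFF tgt (acc, .dash, buf) cs = pvFF tgt (acc, .dash, buf') cs) := by
  induction cs with
  | nil => exact ⟨fun _ _ _ _ => rfl, fun _ _ _ _ => rfl⟩
  | cons c cs ih =>
    have hsc : ∀ (tgt : List Char) (acc : PvAcc) (buf buf' : List Char),
        pvFF tgt (pvStartCase acc buf c) cs = pvFF tgt (pvStartCase acc buf' c) cs := by
      intro tgt acc buf buf'
      unfold pvStartCase
      by_cases h1 : PySem.Chars.isspace c = true
      · simp only [h1, if_true]; exact ih.1 tgt acc buf buf'
      · simp only [h1]
        by_cases h2 : (PySem.Chars.isalpha c || c == '_') = true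
        · simp [h2]
        · simp only [h2]
          by_cases h3 : PySem.Chars.isdigit c = true
          · simp [h3]
          · simp only [h3]
            by_cases h4 : (c == '-') = true
            · simp only [h4, if_true]; exact ih.2 tgt acc buf buf'
            · simp only [h4]
              by_cases h5 : (c == '\'') = true
              · simp [h5]
              · simp only [h5]
                by_cases h6 : (c == '=' || c == '<' || c == '>' || c == '!') = true
                · simp [h6]
                · simp only [h6]
                  exact ih.1 tgt _ buf buf'
    constructor
    · intro tgt acc buf buf'
      rw [pvFF_cons, pvFF_cons]
      exact hsc tgt acc buf buf'
    · intro tgt acc buf buf'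
      rw [pvFF_cons, pvFF_cons]
      by_cases hd : PySem.Chars.isdigit c = true
      · simp [pvStep, hd]
      · have e : ∀ b, pvStep tgt (acc, .dash, b) c = pvStartCase (acc.1 ++ [['-']], acc.2) b c := by
          intro b; simp [pvStep, hd]
        rw [e, e]
        exact hsc tgt _ buf buf'

-- B in IDENT state consumes exactly A's ident run, then emits and re-dispatches
theorem pvScan_ident_state (cs : List Char) : ∀ (tgt : List Char) (acc : PvAcc) (buf : List Char),
    pvFF tgt (acc, .ident, buf) cs
      = pvFF tgt (pvEmitIdent tgt acc (buf ++ (pvScanIdent cs).1), .start,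
                  buf ++ (pvScanIdent cs).1) (pvScanIdent cs).2 := by
  induction cs with
  | nil => intro tgt acc buf; simp [pvFF, pvScanIdent, pvFinish]
  | cons c cs ih =>
    intro tgt acc buf
    by_cases h : pvIdentCont c
    · rw [pvFF_cons]
      have : pvStep tgt (acc, .ident, buf) c = (acc, .ident, buf ++ [c]) := by
        simp [pvStep, h]
      rw [this, ih]
      simp [pvScanIdent, h, List.append_assoc]
    · rw [pvFF_cons]
      have : pvStep tgt (acc, .ident, buf) c = pvStartCase (pvEmitIdent tgt acc buf) buf c := by
        simp [pvStep, h]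
      rw [this]
      have h2 : pvScanIdent (c :: cs) = ([], c :: cs) := by simp [pvScanIdent, h]
      rw [h2]
      simp only [List.append_nil]
      rw [pvFF_cons]
      rfl

theorem pvScan_num_state (cs : List Char) : ∀ (tgt : List Char) (acc : PvAcc) (buf : List Char),
    pvFF tgt (acc, .num, buf) cs
      = pvFF tgt ((acc.1 ++ [buf ++ (pvScanNum cs).1], acc.2), .start,
                  buf ++ (pvScanNum cs).1) (pvScanNum cs).2 := by
  induction cs with
  | nil => intro tgt acc buf; simp [pvFF, pvScanNum, pvFinish]
  | cons c cs ih =>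
    intro tgt acc buf
    by_cases h : (PySem.Chars.isdigit c || c == '.') = true
    · rw [pvFF_cons]
      have : pvStep tgt (acc, .num, buf) c = (acc, .num, buf ++ [c]) := by
        simp [pvStep, h]
      rw [this, ih]
      simp [pvScanNum, h, List.append_assoc]
    · rw [pvFF_cons]
      have : pvStep tgt (acc, .num, buf) c = pvStartCase (acc.1 ++ [buf], acc.2) buf c := by
        simp [pvStep, h]
      rw [this]
      have h2 : pvScanNum (c :: cs) = ([], c :: cs) := by simp [pvScanNum, h]
      rw [h2]
      simp only [List.append_nil]
      rw [pvFF_cons]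
      rfl

-- B in STR/STRQ states consumes exactly A's string run
theorem pvScan_str_state (cs : List Char) : ∀ (tgt : List Char) (acc : PvAcc) (buf : List Char),
    pvFF tgt (acc, .strg, buf) cs
      = pvFF tgt ((acc.1 ++ [pvQuote (buf ++ (pvScanStr cs).1)], acc.2), .start, buf)
          (pvScanStr cs).2 := by
  induction cs using pvScanStr.induct with
  | case1 =>
    intro tgt acc buf
    simp [pvFF, pvScanStr, pvFinish]
  | case2 c hq c2 cs2 hq2 ih =>
    intro tgt acc buf
    rw [beq_iff_eq] at hq hq2
    subst hq; subst hq2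
    rw [pvFF_cons, pvFF_cons]
    have e1 : pvStep tgt (acc, .strg, buf) '\'' = (acc, .strq, buf) := by simp [pvStep]
    have e2 : pvStep tgt (acc, .strq, buf) '\'' = (acc, .strg, buf ++ ['\'']) := by simp [pvStep]
    rw [e1, e2, ih]
    have e3 : pvScanStr ('\'' :: '\'' :: cs2) = ('\'' :: (pvScanStr cs2).1, (pvScanStr cs2).2) := by
      simp [pvScanStr]
    rw [e3]
    simp only [List.append_assoc, List.cons_append, List.nil_append]
    exact (pvFF_buf_irrel _).1 tgt _ _ _
  | case3 c hq c2 cs2 hq2 =>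
    intro tgt acc buf
    rw [beq_iff_eq] at hq
    subst hq
    rw [pvFF_cons, pvFF_cons]
    have e1 : pvStep tgt (acc, .strg, buf) '\'' = (acc, .strq, buf) := by simp [pvStep]
    have e2 : pvStep tgt (acc, .strq, buf) c2
        = pvStartCase (acc.1 ++ [pvQuote buf], acc.2) buf c2 := by
      simp [pvStep, hq2]
    rw [e1, e2]
    have e3 : pvScanStr ('\'' :: c2 :: cs2) = ([], c2 :: cs2) := by
      simp [pvScanStr, hq2]
    rw [e3]
    simp only [List.append_nil]
    rw [pvFF_cons]
    rfl
  | case4 c hq =>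
    intro tgt acc buf
    rw [beq_iff_eq] at hq
    subst hq
    rw [pvFF_cons]
    have e1 : pvStep tgt (acc, .strg, buf) '\'' = (acc, .strq, buf) := by simp [pvStep]
    rw [e1]
    simp [pvFF, pvScanStr, pvFinish]
  | case5 c cs hq ih =>
    intro tgt acc buf
    rw [pvFF_cons]
    have e1 : pvStep tgt (acc, .strg, buf) c = (acc, .strg, buf ++ [c]) := by simp [pvStep, hq]
    rw [e1, ih]
    have e3 : pvScanStr (c :: cs) = (c :: (pvScanStr cs).1, (pvScanStr cs).2) := by
      rw [pvScanStr.eq_def]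
      simp [hq]
    rw [e3]
    simp only [List.append_assoc, List.cons_append, List.nil_append]
    exact (pvFF_buf_irrel _).1 tgt _ _ _

theorem pvMain : ∀ (n : Nat) (cs : List Char), cs.length ≤ n →
    ∀ (target : List Char) (t p : List (List Char)) (buf : List Char),
    pvFF (PySem.Chars.lower target) ((p, t), .start, buf) cs
      = (((pvTokenize cs).foldl (pvRewriteTok target) (t, p)).2,
         ((pvTokenize cs).foldl (pvRewriteTok target) (t, p)).1) := by
  intro n
  induction n with
  | zero =>
    intro cs hlen target t p buf
    have : cs = [] := List.length_eq_zero_iff.mp (Nat.le_zero.mp hlen)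
    subst this
    rw [pvTokenize.eq_def]; rfl
  | succ n ih =>
    intro cs hlen target t p buf
    match cs with
    | [] => rw [pvTokenize.eq_def]; rfl
    | c :: cs =>
      simp only [List.length_cons, Nat.add_le_add_iff_right] at hlen
      rw [pvTokenize.eq_def]
      by_cases h1 : PySem.Chars.isspace c = true
      · -- whitespace: both skip
        have e : pvStep (PySem.Chars.lower target) ((p, t), .start, buf) c
            = ((p, t), .start, buf) := by
          simp [pvStep, pvStartCase, h1]
        rw [pvFF_cons, e]
        simp only [h1, if_true]
        exact ih cs hlen target t p buf
      · by_cases h2 : (PySem.Chars.isalpha c || c == '_') = true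
        · -- identifier
          have hsp : PySem.Chars.isspace c = false := by simpa using h1
          have e : pvStep (PySem.Chars.lower target) ((p, t), .start, buf) c
              = ((p, t), .ident, [c]) := by
            simp [pvStep, pvStartCase, hsp, h2]
          rw [pvFF_cons, e, pvScan_ident_state]
          simp only [h1, h2, if_true, if_false, Bool.false_eq_true, List.singleton_append]
          rw [List.foldl_cons, pvTok_ident]
          have hrest : (pvScanIdent cs).2.length ≤ n :=
            le_trans (pvScanIdent_rest_le cs) hlen
          rw [ih _ hrest target _ _ _]
        · by_cases h3 : (PySem.Chars.isdigit c || (c == '-' && cs.head?.any PySem.Chars.isdigit)) = true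
          · -- number
            by_cases h3a : PySem.Chars.isdigit c = true
            · have hsp := pv_digit_not_space c h3a
              have hal := pv_digit_not_alpha c h3a
              have e : pvStep (PySem.Chars.lower target) ((p, t), .start, buf) c
                  = ((p, t), .num, [c]) := by
                simp [pvStep, pvStartCase, hsp, hal, h3a]
              rw [pvFF_cons, e, pvScan_num_state]
              simp only [h1, h2, h3, if_true, if_false, Bool.false_eq_true, List.singleton_append]
              rw [List.foldl_cons, pvTok_number]
              have hrest : (pvScanNum cs).2.length ≤ n :=
                le_trans (pvScanNum_rest_le cs) hlen
              rw [ih _ hrest target _ _ _]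
            · -- '-' followed by a digit
              have h3' := h3
              simp only [Bool.or_eq_true, Bool.and_eq_true, beq_iff_eq] at h3'
              have hm : c = '-' := by
                rcases h3' with h | h
                · exact absurd h h3a
                · exact h.1
              subst hm
              match cs, hlen with
              | c2 :: cs2, hlen =>
                have hd2 : PySem.Chars.isdigit c2 = true := by
                  rcases h3' with h | h
                  · exact absurd h h3a
                  · simpa using h.2
                have e : pvStep (PySem.Chars.lower target) ((p, t), .start, buf) '-'
                    = ((p, t), .dash, buf) := rfl
                have e2 : pvStep (PySem.Chars.lower target) ((p, t), .dash, buf) c2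
                    = ((p, t), .num, ['-', c2]) := by
                  simp [pvStep, hd2]
                rw [pvFF_cons, e, pvFF_cons, e2, pvScan_num_state]
                simp only [h1, h2, h3, if_true, if_false, Bool.false_eq_true]
                have escan : pvScanNum (c2 :: cs2) = (c2 :: (pvScanNum cs2).1, (pvScanNum cs2).2) := by
                  simp [pvScanNum, hd2]
                rw [escan, List.foldl_cons, pvTok_number]
                have hrest : (pvScanNum cs2).2.length ≤ n := by
                  have := pvScanNum_rest_le cs2
                  simp only [List.length_cons] at hlen
                  omega
                rw [ih _ hrest target _ _ _]
                rfl
          · by_cases h4 : (c == '\'') = true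
            · -- string literal
              have hc : c = '\'' := beq_iff_eq.mp h4
              subst hc
              have e : pvStep (PySem.Chars.lower target) ((p, t), .start, buf) '\''
                  = ((p, t), .strg, []) := rfl
              rw [pvFF_cons, e, pvScan_str_state]
              simp only [h1, h2, h3, if_true, if_false, Bool.false_eq_true, List.nil_append,
                beq_self_eq_true]
              rw [List.foldl_cons, pvTok_string]
              have hrest : (pvScanStr cs).2.length ≤ n :=
                le_trans (pvScanStr_rest_le cs) hlen
              rw [ih _ hrest target _ _ _]
            · by_cases h5 : (c == '(' || c == ')' || c == ',') = true
              · -- punctuation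
                have e : pvStep (PySem.Chars.lower target) ((p, t), .start, buf) c
                    = ((p ++ [[c]], t), .start, buf) := by
                  have h5' := h5
                  simp only [Bool.or_eq_true, beq_iff_eq] at h5'
                  rcases h5' with (h | h) | h <;> (rw [h]; rfl)
                rw [pvFF_cons, e]
                simp only [h1, h2, h3, h4, h5, if_true, if_false, Bool.false_eq_true]
                rw [List.foldl_cons, pvTok_char]
                exact ih cs hlen target t (p ++ [[c]]) buf
              · have hdig : PySem.Chars.isdigit c = false := by
                  revert h3; cases PySem.Chars.isdigit c <;> simp
                by_cases h6 : (c == '=' || c == '<' || c == '>' || c == '!') = true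
                · -- comparison operator
                  have hdash : (c == '-') = false := by
                    have h6' := h6
                    simp only [Bool.or_eq_true, beq_iff_eq] at h6'
                    rcases h6' with ((h | h) | h) | h <;> (rw [h]; rfl)
                  have e : pvStep (PySem.Chars.lower target) ((p, t), .start, buf) c
                      = ((p, t), .op, [c]) := by
                    simp [pvStep, pvStartCase, h1, h2, hdig, hdash, h4, h6]
                  match cs, hlen with
                  | [], hlen =>
                    rw [pvFF_cons, e]
                    simp only [h1, h2, h3, h4, h5, h6, if_true, if_false, Bool.false_eq_true]
                    rw [if_neg (show ¬ (([] : List Char).head? = some '=') by simp)]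
                    rw [pvTokenize.eq_def]
                    simp only [List.foldl_cons, pvTok_op, List.foldl_nil]
                    rfl
                  | c2 :: cs2, hlen =>
                    simp only [List.length_cons] at hlen
                    by_cases he : c2 = '='
                    · subst he
                      rw [pvFF_cons, e, pvFF_cons]
                      have e2 : pvStep (PySem.Chars.lower target) ((p, t), .op, [c]) '='
                          = ((p ++ [[c] ++ ['=']], t), .start, [c]) := rfl
                      rw [e2]
                      simp only [h1, h2, h3, h4, h5, h6, if_true, if_false, Bool.false_eq_true]
                      rw [if_pos (show (('=' :: cs2).head? = some '=') from rfl), List.tail_cons]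
                      rw [List.foldl_cons, pvTok_op]
                      have hrest : cs2.length ≤ n := by omega
                      exact ih cs2 hrest target t (p ++ [[c] ++ ['=']]) [c]
                    · rw [pvFF_cons, e, pvFF_cons]
                      have e2 : pvStep (PySem.Chars.lower target) ((p, t), .op, [c]) c2
                          = pvStartCase (p ++ [[c]], t) [c] c2 := by
                        have : (c2 == '=') = false := by simp [he]
                        simp [pvStep, this]
                      rw [e2]
                      have hh : ¬ ((c2 :: cs2).head? = some '=') := by simp [he]
                      simp only [h1, h2, h3, h4, h5, h6, if_true, if_false, Bool.false_eq_true]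
                      rw [if_neg hh]
                      rw [List.foldl_cons, pvTok_op]
                      have hrest : (c2 :: cs2).length ≤ n := by simp; omega
                      have := ih (c2 :: cs2) hrest target t (p ++ [[c]]) [c]
                      rw [pvFF_cons] at this
                      exact this
                · -- default single character
                  by_cases hdash : (c == '-') = true
                  · have hm : c = '-' := beq_iff_eq.mp hdash
                    subst hm
                    have e : pvStep (PySem.Chars.lower target) ((p, t), .start, buf) '-'
                        = ((p, t), .dash, buf) := rfl
                    match cs, hlen with
                    | [], hlen =>
                      rw [pvFF_cons, e]
                      simp only [h1, h2, h3, h4, h5, h6, if_true, if_false, Bool.false_eq_true]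
                      rw [pvTokenize.eq_def]
                      simp only [List.foldl_cons, pvTok_char, List.foldl_nil]
                      rfl
                    | c2 :: cs2, hlen =>
                      simp only [List.length_cons] at hlen
                      have hd2 : ¬ (PySem.Chars.isdigit c2 = true) := by
                        intro hd2
                        exact h3 (by simp [hd2])
                      rw [pvFF_cons, e, pvFF_cons]
                      have e2 : pvStep (PySem.Chars.lower target) ((p, t), .dash, buf) c2
                          = pvStartCase (p ++ [['-']], t) buf c2 := by
                        simp [pvStep, hd2]
                      rw [e2]
                      simp only [h1, h2, h3, h4, h5, h6, if_true, if_false, Bool.false_eq_true]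
                      rw [List.foldl_cons, pvTok_char]
                      have hrest : (c2 :: cs2).length ≤ n := by simp; omega
                      have := ih (c2 :: cs2) hrest target t (p ++ [['-']]) buf
                      rw [pvFF_cons] at this
                      exact this
                  · have e : pvStep (PySem.Chars.lower target) ((p, t), .start, buf) c
                        = ((p ++ [[c]], t), .start, buf) := by
                      simp [pvStep, pvStartCase, h1, h2, hdig, hdash, h4, h6]
                    rw [pvFF_cons, e]
                    simp only [h1, h2, h3, h4, h5, h6, if_true, if_false, Bool.false_eq_true]
                    rw [List.foldl_cons, pvTok_char]
                    exact ih cs hlen target t (p ++ [[c]]) buf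

theorem pv_final (target expr : String) :
    rewrite_policy_expr target expr = rewrite_policy_expr_alt target expr := by
  unfold rewrite_policy_expr rewrite_policy_expr_alt
  have h' : pvFinish (PySem.Chars.lower target.toList)
      (List.foldl (pvStep (PySem.Chars.lower target.toList)) (([], []), PvSt.start, []) expr.toList)
      = (((pvTokenize expr.toList).foldl (pvRewriteTok target.toList) ([], [])).2,
         ((pvTokenize expr.toList).foldl (pvRewriteTok target.toList) ([], [])).1) :=
    pvMain expr.toList.length expr.toList le_rfl target.toList [] [] []
  simp only [h']

-- ===== VERDICT (by name: the statement is the Claim_ definition above) =====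
theorem rewrite_policy_expr_spec : Claim_equal_rewrite_policy_expr := by
  intro target expr _
  unfold Spec_rewrite_policy_expr
  exact pv_final target expr
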